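-- pv_equiv track=rewrite | github.com/alexfdez1010/mimic-chess | utils/uci_to_action.py | tuple_to_uci
-- ===== SOURCE A (Python) =====
-- from typing import Tuple, Optional
--
-- PROMOTIONS = {
--     'n': 0,
--     'b': 1,
--     'r': 2,
-- }
--
-- DIRECTIONS = [
--     (1, 0),  # N
--     (1, 1),  # NE
--     (0, 1),  # E
--     (-1, 1),  # SE
--     (-1, 0),  # S
--     (-1, -1),  # SO
--     (0, -1),  # O
--     (1, -1)  # NO
-- ]
--
-- KNIGHT_MOVES_INVERSE = {
--     0: (2, 1),
--     1: (1, 2),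
--     2: (-1, 2),
--     3: (-2, 1),
--     4: (-2, -1),
--     5: (-1, -2),
--     6: (1, -2),
--     7: (2, -1)
-- }
--
-- def tuple_to_uci(tuple_move: Tuple[int, int, int]) -> Optional[str]:
--     """
--     Convierte una tupla a la cadena correspondiente en formato UCI
--     :param tuple_move: tupla a la que se ha convertido el movimiento uci
--     :return: la cadena correspondiente en formato UCI
--     """
--     if tuple == (-1, -1, -1):
--         return None
--
--     move, row_from, col_from = tuple_move
--
--     row_from_uci = chr(ord('1') + row_from)
--     col_from_uci = chr(ord('a') + col_from)
--
--     promotion = ''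
--
--     if move < 56:
--         row_to = row_from + DIRECTIONS[move // 7][0] * ((move % 7) + 1)
--         col_to = col_from + DIRECTIONS[move // 7][1] * ((move % 7) + 1)
--     elif move < 64:
--         row_to = row_from + KNIGHT_MOVES_INVERSE[move - 56][0]
--         col_to = col_from + KNIGHT_MOVES_INVERSE[move - 56][1]
--     else:
--         row_to = row_from + 1
--         col_to = ((move - 64) % 3) - 1 + col_from
--         promotion = (move - 64) // 3
--
--         for p in PROMOTIONS:
--             if promotion == PROMOTIONS[p]:
--                 promotion = p
--                 break
--
--     row_to_uci = chr(ord('1') + row_to)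
--     col_to_uci = chr(ord('a') + col_to)
--
--     return f'{col_from_uci}{row_from_uci}{col_to_uci}{row_to_uci}{promotion}'
-- ===== SOURCE B (Python) =====
-- # Flat table-driven decode: one (row_delta, col_delta, promotion) triple per move index,
-- # no range branching inside the function; returns None on the (-1, -1, -1) sentinel.
--
-- DIRECTIONS = [
--     (1, 0), (1, 1), (0, 1), (-1, 1), (-1, 0), (-1, -1), (0, -1), (1, -1)
-- ]
--
-- MOVE_DELTAS = (
--     [(dr * k, dc * k, '') for dr, dc in DIRECTIONS for k in range(1, 8)]
--     + [(2, 1, ''), (1, 2, ''), (-1, 2, ''), (-2, 1, ''),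
--        (-2, -1, ''), (-1, -2, ''), (1, -2, ''), (2, -1, '')]
--     + [(1, dc, p) for p in 'nbr' for dc in (-1, 0, 1)]
-- )
--
--
-- def tuple_to_uci(tuple_move):
--     """
--     Convierte una tupla a la cadena correspondiente en formato UCI
--     """
--     if tuple_move == (-1, -1, -1):
--         return None
--
--     move, row_from, col_from = tuple_move
--     dr, dc, promotion = MOVE_DELTAS[move]
--
--     return (chr(ord('a') + col_from) + chr(ord('1') + row_from)
--             + chr(ord('a') + col_from + dc) + chr(ord('1') + row_from + dr)
--             + promotion)
-- ===== Notes on version B (the rewrite author's own statement) =====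
-- stated objective: idiomatic
-- what changed: Replaces A's three-way branch with direction/knight/promotion arithmetic and a linear promotion-dict scan by a single flat 73-entry MOVE_DELTAS table mapping each move index to (row_delta, col_delta, promotion), so the function body is one branch-free table lookup plus four chr() calls; B also returns None on the (-1,-1,-1) sentinel, which A's 'if tuple == (-1,-1,-1)' (comparing the builtin type) never does.
-- intended difference: On the null-move sentinel (-1,-1,-1) A returns '`0Y7' (its sentinel test compares the builtin type tuple, so it falls through into negative indexing); B returns None, the evidently intended value. — e.g. on tuple_to_uci(-1, -1, -1): A returns some "`0Y7", B returns none
-- outside the precondition, e.g. on tuple_to_uci((73, 0, 0)): A returns 'a1`23', B raises IndexError; on tuple_to_uci((-5, 2, 2)): A returns 'c3`6', B returns 'c3c4b'; on tuple_to_uci((0, -49, 0)): A returns 'a\x00a\x01', B returns 'a\x00a\x01'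
import Mathlib
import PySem

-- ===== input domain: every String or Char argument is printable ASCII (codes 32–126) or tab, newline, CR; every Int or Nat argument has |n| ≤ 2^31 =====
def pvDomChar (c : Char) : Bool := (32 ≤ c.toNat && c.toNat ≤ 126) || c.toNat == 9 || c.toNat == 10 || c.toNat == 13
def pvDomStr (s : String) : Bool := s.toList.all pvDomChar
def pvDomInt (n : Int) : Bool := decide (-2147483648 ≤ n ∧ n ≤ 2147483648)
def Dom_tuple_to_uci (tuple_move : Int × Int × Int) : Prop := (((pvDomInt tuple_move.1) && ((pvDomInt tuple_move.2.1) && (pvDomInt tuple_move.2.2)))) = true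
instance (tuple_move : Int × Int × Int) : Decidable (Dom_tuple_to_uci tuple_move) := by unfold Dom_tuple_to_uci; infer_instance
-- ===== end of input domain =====

-- B replaces A's branch-and-arithmetic decode by one flat 73-entry delta table indexed by the
-- move number, and restores the evidently intended None on the (-1, -1, -1) sentinel.

-- chr(n): exact for 0 ≤ n < 0xD800 (all codes admitted by Pre_); Python also accepts
-- surrogates/astral codes, which Pre_ keeps out.
def pyChr (n : Int) : Option Char :=
  if 0 ≤ n ∧ n < 1114112 then some (Char.ofNat n.toNat) else none

-- ===== PORT A =====
def PROMOTIONS : List (String × Int) := [("n", 0), ("b", 1), ("r", 2)]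

def DIRECTIONS : List (Int × Int) :=
  [(1, 0), (1, 1), (0, 1), (-1, 1), (-1, 0), (-1, -1), (0, -1), (1, -1)]

def KNIGHT_MOVES_INVERSE : PySem.Dict Int (Int × Int) :=
  PySem.Dict.ofList [(0, (2, 1)), (1, (1, 2)), (2, (-1, 2)), (3, (-2, 1)),
                     (4, (-2, -1)), (5, (-1, -2)), (6, (1, -2)), (7, (2, -1))]

-- the 'for p in PROMOTIONS: if promotion == PROMOTIONS[p]: promotion = p; break' loop;
-- if no value matches, promotion stays an int and the f-string renders it via str()
def promoFind : List (String × Int) → Int → String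
  | [], promotion => PySem.Int.toStr promotion
  | (p, v) :: rest, promotion => if promotion = v then p else promoFind rest promotion

def tuple_to_uci (tuple_move : Int × Int × Int) : Option String :=
  -- 'if tuple == (-1, -1, -1)': compares the BUILTIN TYPE tuple, always False — ported as a no-op
  let (move, row_from, col_from) := tuple_move
  (pyChr (49 + row_from)).bind fun row_from_uci =>
  (pyChr (97 + col_from)).bind fun col_from_uci =>
  let res : Option (Int × Int × String) :=
    if move < 56 then
      (PySem.List.pyGet? DIRECTIONS (PySem.Int.floordiv move 7)).map (fun d =>
        (row_from + d.1 * (PySem.Int.mod move 7 + 1),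
         col_from + d.2 * (PySem.Int.mod move 7 + 1), ""))
    else if move < 64 then
      (KNIGHT_MOVES_INVERSE.get? (move - 56)).map (fun d =>
        (row_from + d.1, col_from + d.2, ""))
    else
      some (row_from + 1, PySem.Int.mod (move - 64) 3 - 1 + col_from,
            promoFind PROMOTIONS (PySem.Int.floordiv (move - 64) 3))
  res.bind fun rcp =>
  (pyChr (49 + rcp.1)).bind fun row_to_uci =>
  (pyChr (97 + rcp.2.1)).bind fun col_to_uci =>
  some (String.mk [col_from_uci, row_from_uci, col_to_uci, row_to_uci] ++ rcp.2.2)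

-- ===== PORT B =====
def DIRECTIONS_B : List (Int × Int) :=
  [(1, 0), (1, 1), (0, 1), (-1, 1), (-1, 0), (-1, -1), (0, -1), (1, -1)]

def MOVE_DELTAS : List (Int × Int × String) :=
  (DIRECTIONS_B.flatMap fun d =>
    (List.range 7).map fun k => (d.1 * ((k : Int) + 1), d.2 * ((k : Int) + 1), ""))
  ++ [(2, 1, ""), (1, 2, ""), (-1, 2, ""), (-2, 1, ""),
      (-2, -1, ""), (-1, -2, ""), (1, -2, ""), (2, -1, "")]
  ++ (["n", "b", "r"].flatMap fun p =>
        [(-1 : Int), 0, 1].map fun dc => ((1 : Int), dc, p))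

def tuple_to_uci_alt (tuple_move : Int × Int × Int) : Option String :=
  if tuple_move = (-1, -1, -1) then none
  else
    let (move, row_from, col_from) := tuple_move
    (PySem.List.pyGet? MOVE_DELTAS move).bind fun d =>
    (pyChr (97 + col_from)).bind fun c1 =>
    (pyChr (49 + row_from)).bind fun c2 =>
    (pyChr (97 + col_from + d.2.1)).bind fun c3 =>
    (pyChr (49 + row_from + d.1)).bind fun c4 =>
    some (String.mk [c1, c2, c3, c4] ++ d.2.2)

-- ===== PRECONDITION & SPEC =====
-- Pre_ admits the (-1,-1,-1) null sentinel and the move encoding's natural domain: move index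
-- 0..72, with from-coordinates bounded so that every chr() code A computes is a valid
-- non-surrogate codepoint for every admitted move.  Excluded although A still returns there:
-- move ≥ 73 (A renders the unmatched int promotion as a digit; B's 73-entry table raises
-- IndexError), negative move (both programs' values are accidents of Python negative-index
-- wraparound into different lists), and coordinates outside the bounds (chr codes at or past
-- the surrogate range, or valid only for some moves).
def Pre_tuple_to_uci (tuple_move : Int × Int × Int) : Prop :=
  tuple_move = (-1, -1, -1) ∨
    (0 ≤ tuple_move.1 ∧ tuple_move.1 ≤ 72 ∧
     -42 ≤ tuple_move.2.1 ∧ tuple_move.2.1 ≤ 55000 ∧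
     -90 ≤ tuple_move.2.2 ∧ tuple_move.2.2 ≤ 55000)
instance (tuple_move : Int × Int × Int) : Decidable (Pre_tuple_to_uci tuple_move) := by
  unfold Pre_tuple_to_uci; infer_instance

def pvWitness_tuple_to_uci : (Int × Int × Int) := (66, 6, 3)

-- A compares the builtin type 'tuple' (not tuple_move) to (-1, -1, -1), so on the null-move
-- sentinel (-1, -1, -1) A falls through negative indexing and returns '`0Y7' instead of the
-- evidently intended None, which B returns.
def D_tuple_to_uci (tuple_move : Int × Int × Int) : Prop :=
  tuple_move.1 = -1 ∧ tuple_move.2.1 = -1 ∧ tuple_move.2.2 = -1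
instance (tuple_move : Int × Int × Int) : Decidable (D_tuple_to_uci tuple_move) := by
  unfold D_tuple_to_uci; infer_instance

def Spec_tuple_to_uci (tuple_move : Int × Int × Int) (out : Option String) : Prop :=
  ¬ D_tuple_to_uci tuple_move → out = tuple_to_uci_alt tuple_move
instance (tuple_move : Int × Int × Int) (out : Option String) : Decidable (Spec_tuple_to_uci tuple_move out) := by
  unfold Spec_tuple_to_uci; infer_instance

def pvDiffWitness_tuple_to_uci : (Int × Int × Int) := (-1, -1, -1)
def pvDiffWitnessOut_tuple_to_uci : (Option String) × (Option String) := (some "`0Y7", none)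

-- ===== CLAIM (what is proved, stated in full; the proofs are below) =====
def Claim_unchanged_tuple_to_uci : Prop := ∀ (tuple_move : Int × Int × Int), Dom_tuple_to_uci tuple_move → Pre_tuple_to_uci tuple_move → Spec_tuple_to_uci tuple_move (tuple_to_uci tuple_move)
def Claim_changed_tuple_to_uci : Prop := Dom_tuple_to_uci (pvDiffWitness_tuple_to_uci) ∧ Pre_tuple_to_uci (pvDiffWitness_tuple_to_uci) ∧ D_tuple_to_uci (pvDiffWitness_tuple_to_uci) ∧ tuple_to_uci (pvDiffWitness_tuple_to_uci) = pvDiffWitnessOut_tuple_to_uci.1 ∧ tuple_to_uci_alt (pvDiffWitness_tuple_to_uci) = pvDiffWitnessOut_tuple_to_uci.2 ∧ pvDiffWitnessOut_tuple_to_uci.1 ≠ pvDiffWitnessOut_tuple_to_uci.2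
def Claim_exact_tuple_to_uci : Prop := ∀ (tuple_move : Int × Int × Int), Dom_tuple_to_uci tuple_move → Pre_tuple_to_uci tuple_move → D_tuple_to_uci tuple_move → tuple_to_uci tuple_move ≠ tuple_to_uci_alt tuple_move

-- ===== LEMMAS AND PROOFS =====

-- A's delta computation, factored over the move number only (proof-side helper)
def aDelta (move : Int) : Option (Int × Int × String) :=
  if move < 56 then
    (PySem.List.pyGet? DIRECTIONS (PySem.Int.floordiv move 7)).map (fun d =>
      (d.1 * (PySem.Int.mod move 7 + 1), d.2 * (PySem.Int.mod move 7 + 1), ""))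
  else if move < 64 then
    (KNIGHT_MOVES_INVERSE.get? (move - 56)).map (fun d => (d.1, d.2, ""))
  else
    some (1, PySem.Int.mod (move - 64) 3 - 1,
          promoFind PROMOTIONS (PySem.Int.floordiv (move - 64) 3))

-- for every admitted move, A's deltas equal the table entry, and deltas are bounded by 7
set_option maxRecDepth 4000 in
theorem aDelta_eq_table : ∀ m : Fin 73,
    aDelta (m : Int) = PySem.List.pyGet? MOVE_DELTAS (m : Int) ∧
    ∀ d ∈ PySem.List.pyGet? MOVE_DELTAS (m : Int),
      -7 ≤ d.1 ∧ d.1 ≤ 7 ∧ -7 ≤ d.2.1 ∧ d.2.1 ≤ 7 := by decide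

set_option maxRecDepth 4000 in
theorem table_isSome : ∀ m : Fin 73, (PySem.List.pyGet? MOVE_DELTAS (m : Int)).isSome := by
  decide

theorem res_eq_aDelta (move r c : Int) :
    (if move < 56 then
      (PySem.List.pyGet? DIRECTIONS (PySem.Int.floordiv move 7)).map (fun d =>
        (r + d.1 * (PySem.Int.mod move 7 + 1),
         c + d.2 * (PySem.Int.mod move 7 + 1), ""))
    else if move < 64 then
      (KNIGHT_MOVES_INVERSE.get? (move - 56)).map (fun d => (r + d.1, c + d.2, ""))
    else
      some (r + 1, PySem.Int.mod (move - 64) 3 - 1 + c,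
            promoFind PROMOTIONS (PySem.Int.floordiv (move - 64) 3)))
    = (aDelta move).map (fun d => (r + d.1, c + d.2.1, d.2.2)) := by
  unfold aDelta
  split_ifs with h1 h2
  · simp only [Option.map_map]; rfl
  · simp only [Option.map_map]; rfl
  · simp only [Option.map_some]
    rw [Int.add_comm (PySem.Int.mod (move - 64) 3 - 1) c]

theorem pyChr_eq (n : Int) (h0 : 0 ≤ n) (h1 : n < 1114112) :
    pyChr n = some (Char.ofNat n.toNat) := by
  unfold pyChr; rw [if_pos ⟨h0, h1⟩]

-- ===== VERDICT (by name: the statement is the Claim_ definition above) =====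
theorem tuple_to_uci_spec : Claim_unchanged_tuple_to_uci := by
  intro t hdom hpre hnd
  obtain ⟨move, r, c⟩ := t
  rcases hpre with hs | ⟨hm0, hm1, hr0, hr1, hc0, hc1⟩
  · injection hs with ha hbc
    injection hbc with hb hc
    exact absurd ⟨ha, hb, hc⟩ hnd
  simp only at hm0 hm1 hr0 hr1 hc0 hc1
  have hne : ((move, r, c) : Int × Int × Int) ≠ (-1, -1, -1) := by
    intro h; injection h with h1 h2; omega
  have hmfin : move = ((⟨move.toNat, by omega⟩ : Fin 73) : Int) := by
    simp [Int.toNat_of_nonneg hm0]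
  obtain ⟨heq, hbnd⟩ := aDelta_eq_table ⟨move.toNat, by omega⟩
  have hsome := table_isSome ⟨move.toNat, by omega⟩
  rw [← hmfin] at heq hbnd hsome
  obtain ⟨⟨dr, dc, p⟩, hd⟩ := Option.isSome_iff_exists.mp hsome
  obtain ⟨hdr0, hdr1, hdc0, hdc1⟩ := hbnd _ (by rw [hd]; exact Option.mem_some_iff.mpr rfl)
  have hdr0' : -7 ≤ dr := hdr0
  have hdr1' : dr ≤ 7 := hdr1
  have hdc0' : -7 ≤ dc := hdc0
  have hdc1' : dc ≤ 7 := hdc1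
  show tuple_to_uci (move, r, c) = tuple_to_uci_alt (move, r, c)
  unfold tuple_to_uci tuple_to_uci_alt
  rw [if_neg hne]
  simp only [res_eq_aDelta move r c, heq, hd, Option.map_some, Option.bind_some,
    pyChr_eq (49 + r) (by omega) (by omega),
    pyChr_eq (97 + c) (by omega) (by omega),
    pyChr_eq (49 + (r + dr)) (by omega) (by omega),
    pyChr_eq (97 + (c + dc)) (by omega) (by omega),
    pyChr_eq (49 + r + dr) (by omega) (by omega),
    pyChr_eq (97 + c + dc) (by omega) (by omega)]
  have e1 : 49 + (r + dr) = 49 + r + dr := by omega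
  have e2 : 97 + (c + dc) = 97 + c + dc := by omega
  rw [e1, e2]

theorem tuple_to_uci_changed : Claim_changed_tuple_to_uci := by
  unfold Claim_changed_tuple_to_uci; decide

theorem tuple_to_uci_tight : Claim_exact_tuple_to_uci := by
  intro t _ _ hd
  obtain ⟨move, r, c⟩ := t
  obtain ⟨h1, h2, h3⟩ := hd
  simp only at h1 h2 h3
  subst h1; subst h2; subst h3; decide
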